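-- pv_equiv track=rewrite | github.com/sheldoer/Suda_examination_notes | 复试笔记/本科python试题/1702模拟题_120min/1702.py | findMultiAlphaWords
-- ===== SOURCE A (Python) =====
-- def findMultiAlphaWords(lst, n):
--      # ----找出单词中，存在某个字母重复num次的单词-----
--     wlst=[]
--     #clst=[]
--     #lst=list(set(lst))
--     for i in lst:
--         word=i.lower()             #将单词所有字母小写，以便检测出现频率
--         #if word not in clst:
--             #clst.append(word)
--         for j in word:
--             if word.count(j)>=n:   #检查单词里出现频次大于n的
--                 wlst.append(i)
--                 break
--     return wlst
-- ===== SOURCE B (Python) =====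
-- def findMultiAlphaWords(lst, n):
--     res = []
--     for w in lst:
--         word = w.lower()
--         if word:
--             chars = sorted(word)
--             best = 1
--             cur = 1
--             for k in range(1, len(chars)):
--                 if chars[k] == chars[k - 1]:
--                     cur += 1
--                     if cur > best:
--                         best = cur
--                 else:
--                     cur = 1
--             if best >= n:
--                 res.append(w)
--     return res
-- ===== Notes on version B (the rewrite author's own statement) =====
-- stated objective: alternative
-- what changed: A tests each character with a fresh word.count scan inside the loop (quadratic per word); B sorts the lowercased word once and finds the longest run of equal consecutive characters in a single scan, appending the word when that run length reaches n (empty words are never appended, as in A).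
import Mathlib
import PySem

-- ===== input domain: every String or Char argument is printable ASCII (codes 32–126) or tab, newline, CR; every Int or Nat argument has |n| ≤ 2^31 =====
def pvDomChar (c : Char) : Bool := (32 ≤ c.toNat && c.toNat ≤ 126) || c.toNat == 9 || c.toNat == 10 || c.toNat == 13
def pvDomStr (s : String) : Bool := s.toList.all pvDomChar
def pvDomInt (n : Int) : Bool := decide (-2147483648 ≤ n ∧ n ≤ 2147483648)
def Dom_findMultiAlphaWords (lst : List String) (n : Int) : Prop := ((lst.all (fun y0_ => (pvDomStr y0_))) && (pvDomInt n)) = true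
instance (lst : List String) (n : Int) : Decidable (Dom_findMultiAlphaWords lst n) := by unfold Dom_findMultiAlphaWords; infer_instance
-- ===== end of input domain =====

-- B replaces A's per-character word.count scan by one sort of the lowercased word plus a single
-- longest-equal-run scan; same results, a genuinely different traversal (objective: alternative).

-- ===== PORT A =====
-- inner loop 'for j in word: if word.count(j) >= n: wlst.append(i); break'
-- (word.count(j) is Python str.count of the 1-char string j: PySem.Chars.count word [j])
def aInner (word : List Char) (n : Int) : List Char → Bool
  | [] => false
  | j :: rest => if n ≤ (PySem.Chars.count word [j] : Int) then true else aInner word n rest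

def findMultiAlphaWords (lst : List String) (n : Int) : List String :=
  lst.foldl (fun wlst i =>
    let word := (PySem.Str.lower i).toList
    if aInner word n word then wlst ++ [i] else wlst) []

-- ===== PORT B =====
-- 'for k in range(1, len(chars)): …' carrying (prev char, cur run, best run)
def bScan : List Char → Char → Nat → Nat → Nat
  | [], _, _, best => best
  | c :: rest, p, cur, best =>
    if c == p then bScan rest c (cur + 1) (if cur + 1 > best then cur + 1 else best)
    else bScan rest c 1 best

def bBest : List Char → Nat
  | [] => 1
  | c :: rest => bScan rest c 1 1

def findMultiAlphaWords_alt (lst : List String) (n : Int) : List String :=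
  lst.foldl (fun res w =>
    let word := (PySem.Str.lower w).toList
    if word.isEmpty then res
    else if n ≤ (bBest (PySem.List.sorted word (fun x => x) false) : Int) then res ++ [w]
    else res) []

-- ===== PRECONDITION & SPEC =====
def Spec_findMultiAlphaWords (lst : List String) (n : Int) (out : List String) : Prop := out = findMultiAlphaWords_alt lst n
instance (lst : List String) (n : Int) (out : List String) : Decidable (Spec_findMultiAlphaWords lst n out) := by unfold Spec_findMultiAlphaWords; infer_instance

-- ===== CLAIM (what is proved, stated in full; the proofs are below) =====
def Claim_equal_findMultiAlphaWords : Prop := ∀ (lst : List String) (n : Int), Dom_findMultiAlphaWords lst n → Spec_findMultiAlphaWords lst n (findMultiAlphaWords lst n)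

-- ===== LEMMAS AND PROOFS =====

-- Python str.count with a 1-character needle is character count
theorem chars_count_go_single (c : Char) : ∀ (l : List Char) (fuel acc : Nat), l.length ≤ fuel →
    PySem.Chars.count.go [c] fuel l acc = acc + l.count c
  | [], fuel, acc, _ => by cases fuel <;> simp [PySem.Chars.count.go]
  | h :: t, fuel, acc, hf => by
    cases fuel with
    | zero => simp at hf
    | succ f =>
      have ht : t.length ≤ f := by simpa using hf
      by_cases hc : c = h
      · subst hc
        simp [PySem.Chars.count.go, List.isPrefixOf, chars_count_go_single c t f (acc + 1) ht]
        omega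
      · simp [PySem.Chars.count.go, List.isPrefixOf, hc, chars_count_go_single c t f acc ht,
          Ne.symm hc]

theorem chars_count_single (s : List Char) (c : Char) :
    PySem.Chars.count s [c] = s.count c := by
  simp [PySem.Chars.count, chars_count_go_single c s s.length 0 le_rfl]

-- max of g over a list
def Mx (g : Char → Nat) (s : List Char) : Nat := (s.map g).foldr max 0

theorem Mx_cons (g : Char → Nat) (c : Char) (s : List Char) :
    Mx g (c :: s) = max (g c) (Mx g s) := rfl

theorem le_Mx (g : Char → Nat) : ∀ {s : List Char} {d : Char}, d ∈ s → g d ≤ Mx g s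
  | c :: t, d, h => by
    rw [Mx_cons]
    rcases List.mem_cons.mp h with rfl | h
    · omega
    · have := le_Mx g h; omega

theorem Mx_congr {g g' : Char → Nat} {s : List Char} (h : ∀ d ∈ s, g d = g' d) :
    Mx g s = Mx g' s := by
  unfold Mx
  rw [List.map_congr_left h]

theorem Mx_exists (g : Char → Nat) (s : List Char) :
    Mx g s = 0 ∨ ∃ d ∈ s, Mx g s = g d := by
  induction s with
  | nil => exact Or.inl rfl
  | cons c t ih =>
    rw [Mx_cons]
    rcases ih with h0 | ⟨d, hd, hMd⟩
    · rw [h0]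
      exact Or.inr ⟨c, List.mem_cons_self, by omega⟩
    · rcases Nat.le_total (g c) (Mx g t) with hle | hle
      · exact Or.inr ⟨d, List.mem_cons_of_mem _ hd, by omega⟩
      · exact Or.inr ⟨c, List.mem_cons_self, by omega⟩

def mfun (p : Char) (cur : Nat) (s : List Char) : Char → Nat :=
  fun d => s.count d + if d = p then cur else 0

-- invariant of the run scan on a sorted tail
theorem bScan_eq (s : List Char) : ∀ (p : Char) (cur best : Nat),
    s.Pairwise (· ≤ ·) → (∀ x ∈ s, p ≤ x) → 1 ≤ best →
    bScan s p cur best = max best (Mx (mfun p cur s) s) := by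
  induction s with
  | nil => intro p cur best _ _ _; simp [bScan, Mx]
  | cons c rest ih =>
    intro p cur best hs hlb hb
    rw [List.pairwise_cons] at hs
    obtain ⟨h1, h2⟩ := hs
    have hpc : p ≤ c := hlb c List.mem_cons_self
    rw [Mx_cons]
    by_cases hcp : c = p
    · subst hcp
      have hupd : (if cur + 1 > best then cur + 1 else best) = max best (cur + 1) := by
        split <;> omega
      rw [bScan]
      simp only [BEq.rfl, if_true, hupd]
      rw [ih c (cur + 1) (max best (cur + 1)) h2 h1 (by omega)]
      have hcg : Mx (mfun c cur (c :: rest)) rest = Mx (mfun c (cur + 1) rest) rest := by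
        apply Mx_congr
        intro d hd
        by_cases hdc : d = c
        · subst hdc
          simp [mfun, List.count_cons_self]
          omega
        · simp [mfun, hdc, Ne.symm hdc]
      rw [hcg]
      have hhead : mfun c cur (c :: rest) c = rest.count c + 1 + cur := by
        simp [mfun, List.count_cons_self]
      rw [hhead]
      by_cases hmem : c ∈ rest
      · have hX : rest.count c + (cur + 1) ≤ Mx (mfun c (cur + 1) rest) rest := by
          have := le_Mx (mfun c (cur + 1) rest) hmem
          simpa [mfun] using this
        have hpos : 0 < rest.count c := List.count_pos_iff.mpr hmem
        omega
      · have h0 : rest.count c = 0 := List.count_eq_zero.mpr hmem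
        omega
    · have hlt : p < c := lt_of_le_of_ne hpc (fun h => hcp h.symm)
      have hnp : p ∉ rest := fun hm => absurd (lt_of_lt_of_le hlt (h1 p hm)) (lt_irrefl p)
      rw [bScan]
      simp only [beq_iff_eq, hcp, if_false]
      rw [ih c 1 best h2 h1 hb]
      have hcg : Mx (mfun p cur (c :: rest)) rest = Mx (mfun c 1 rest) rest := by
        apply Mx_congr
        intro d hd
        have hdp : d ≠ p := fun h => hnp (h ▸ hd)
        by_cases hdc : d = c
        · subst hdc
          simp [mfun, List.count_cons_self, hdp]
        · simp [mfun, hdc, Ne.symm hdc, hdp]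
      rw [hcg]
      have hhead : mfun p cur (c :: rest) c = rest.count c + 1 := by
        simp [mfun, hcp]
      rw [hhead]
      by_cases hmem : c ∈ rest
      · have hX : rest.count c + 1 ≤ Mx (mfun c 1 rest) rest := by
          have := le_Mx (mfun c 1 rest) hmem
          simpa [mfun] using this
        omega
      · have h0 : rest.count c = 0 := List.count_eq_zero.mpr hmem
        omega

-- A's inner break-loop is an existence test
theorem aInner_iff (w : List Char) (n : Int) (s : List Char) :
    aInner w n s = true ↔ ∃ j ∈ s, n ≤ (w.count j : Int) := by
  induction s with
  | nil => simp [aInner]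
  | cons j t ih =>
    rw [aInner, chars_count_single]
    by_cases h : n ≤ (w.count j : Int)
    · simp only [if_pos h, true_iff]
      exact ⟨j, List.mem_cons_self, h⟩
    · rw [if_neg h, ih]
      constructor
      · rintro ⟨x, hx, hnx⟩
        exact ⟨x, List.mem_cons_of_mem _ hx, hnx⟩
      · rintro ⟨x, hx, hnx⟩
        rcases List.mem_cons.mp hx with rfl | hx
        · exact absurd hnx h
        · exact ⟨x, hx, hnx⟩

-- key equivalence on one non-empty word
theorem exists_count_iff (w : List Char) (hw : w ≠ []) (n : Int) :
    (∃ j ∈ w, n ≤ (w.count j : Int)) ↔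
      n ≤ (bBest (PySem.List.sorted w (fun x => x) false) : Int) := by
  set s := PySem.List.sorted w (fun x => x) false with hsdef
  have hperm : s.Perm w := PySem.List.sorted_perm w (fun x => x) false
  have hsne : s ≠ [] := by
    intro h
    rw [hsdef] at h
    rw [PySem.List.sorted_eq_nil_iff] at h
    exact hw h
  obtain ⟨c, rest, hcr⟩ := List.exists_cons_of_ne_nil hsne
  have hpw : s.Pairwise (· ≤ ·) := by
    have := PySem.List.sorted_pairwise w (fun x => x)
    simpa [hsdef] using this
  rw [hcr, List.pairwise_cons] at hpw
  obtain ⟨h1, h2⟩ := hpw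
  have hbb : bBest s = max 1 (Mx (mfun c 1 rest) rest) := by
    rw [hcr, bBest, bScan_eq rest c 1 1 h2 h1 le_rfl]
  have hcnt : ∀ j, w.count j = s.count j := fun j => (hperm.count_eq j).symm
  have hmem : ∀ j, j ∈ w ↔ j ∈ s := fun j => hperm.mem_iff.symm
  constructor
  · rintro ⟨j, hj, hnj⟩
    rw [hcnt j] at hnj
    have hjs : j ∈ s := (hmem j).mp hj
    have hcountK : s.count j ≤ bBest s := by
      rw [hbb, hcr]
      rcases (by rw [hcr] at hjs; exact List.mem_cons.mp hjs) with hjc | hjr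
      · subst hjc
        rw [List.count_cons_self]
        by_cases hm : j ∈ rest
        · have := le_Mx (mfun j 1 rest) hm
          simp [mfun] at this
          omega
        · have h0 : rest.count j = 0 := List.count_eq_zero.mpr hm
          omega
      · by_cases hjc : j = c
        · subst hjc
          rw [List.count_cons_self]
          have := le_Mx (mfun j 1 rest) hjr
          simp [mfun] at this
          omega
        · rw [List.count_cons, if_neg (by simpa using (Ne.symm hjc))]
          have := le_Mx (mfun c 1 rest) hjr
          simp [mfun, hjc] at this
          omega
    calc n ≤ (s.count j : Int) := hnj
      _ ≤ (bBest s : Int) := by exact_mod_cast hcountK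
  · intro hn
    by_cases hn1 : n ≤ 1
    · refine ⟨c, (hmem c).mpr (hcr ▸ List.mem_cons_self), ?_⟩
      rw [hcnt c, hcr, List.count_cons_self]
      have : (1 : Int) ≤ (rest.count c + 1 : Nat) := by exact_mod_cast Nat.succ_le_succ (Nat.zero_le _)
      omega
    · have hn1' : 1 < n := by omega
      have hK2 : 2 ≤ bBest s := by
        have : (1 : Int) < (bBest s : Int) := lt_of_lt_of_le hn1' hn
        exact_mod_cast this
      rw [hbb] at hK2 hn
      have hM : max 1 (Mx (mfun c 1 rest) rest) = Mx (mfun c 1 rest) rest := by omega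
      rw [hM] at hn
      rcases Mx_exists (mfun c 1 rest) rest with h0 | ⟨d, hd, hMd⟩
      · omega
      · rw [hMd] at hn
        by_cases hdc : d = c
        · subst hdc
          refine ⟨d, (hmem d).mpr (hcr ▸ List.mem_cons_self), ?_⟩
          rw [hcnt d, hcr, List.count_cons_self]
          simp [mfun] at hn
          omega
        · refine ⟨d, (hmem d).mpr (hcr ▸ List.mem_cons_of_mem _ hd), ?_⟩
          rw [hcnt d, hcr, List.count_cons, if_neg (by simpa using (Ne.symm hdc))]
          simp [mfun, hdc] at hn
          omega

theorem branch_eq (res : List String) (i : String) (w : List Char) (n : Int) :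
    (if aInner w n w then res ++ [i] else res) =
      (if w.isEmpty then res
       else if n ≤ (bBest (PySem.List.sorted w (fun x => x) false) : Int) then res ++ [i]
       else res) := by
  cases w with
  | nil => simp [aInner]
  | cons c t =>
    simp only [List.isEmpty_cons, if_false, Bool.false_eq_true]
    by_cases h : n ≤ (bBest (PySem.List.sorted (c :: t) (fun x => x) false) : Int)
    · have : aInner (c :: t) n (c :: t) = true :=
        (aInner_iff _ _ _).mpr ((exists_count_iff (c :: t) (by simp) n).mpr h)
      simp [this, h]
    · have : aInner (c :: t) n (c :: t) ≠ true := fun hc =>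
        h ((exists_count_iff (c :: t) (by simp) n).mp ((aInner_iff _ _ _).mp hc))
      simp [this, h]

-- ===== VERDICT (by name: the statement is the Claim_ definition above) =====
theorem findMultiAlphaWords_spec : Claim_equal_findMultiAlphaWords := by
  intro lst n _
  unfold Spec_findMultiAlphaWords findMultiAlphaWords findMultiAlphaWords_alt
  have hstep : (fun (wlst : List String) (i : String) =>
      let word := (PySem.Str.lower i).toList
      if aInner word n word then wlst ++ [i] else wlst) =
      (fun (res : List String) (w : String) =>
      let word := (PySem.Str.lower w).toList
      if word.isEmpty then res
      else if n ≤ (bBest (PySem.List.sorted word (fun x => x) false) : Int) then res ++ [w]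
      else res) := by
    funext res w
    exact branch_eq res w ((PySem.Str.lower w).toList) n
  rw [hstep]
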